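-- pv_equiv track=rewrite | github.com/arshiaafzal/Violin-deit | Deit_origional/curves.py | compute_morton_order
-- ===== SOURCE A (Python) =====
-- def interleave_bits(x, y):
--     """
--     Interleave the bits of two integers (x, y) to compute Morton order.
--     """
--     def split_bits(value):
--         result = 0
--         for i in range(32):  # Support up to 32-bit integers
--             result |= ((value >> i) & 1) << (2 * i)
--         return result
--
--     return split_bits(x) | (split_bits(y) << 1)
--
-- def compute_morton_order(grid):
--     """
--     Compute Morton order for a grid.
--
--     Parameters:
--     - grid: A 2D list representing the grid.
--
--     Returns:
--     - A list of tuples containing Morton keys and coordinates (x, y).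
--     """
--     rows = len(grid)
--     cols = len(grid[0]) if rows > 0 else 0
--     morton_order = []
--
--     for y in range(rows):
--         for x in range(cols):
--             morton_key = interleave_bits(x, y)
--             morton_order.append((morton_key, x, y))
--
--     # Sort by Morton key to achieve the Morton curve order
--     morton_order.sort(key=lambda pair: pair[0])
--     return [(x, y) for _, x, y in morton_order]
-- ===== SOURCE B (Python) =====
-- def compute_morton_order(grid):
--     """Z-order traversal by recursive quadrant subdivision: emit coordinates
--     directly in Morton order (no key computation, no sort)."""
--     rows = len(grid)
--     cols = len(grid[0]) if rows > 0 else 0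
--     m = rows if rows > cols else cols
--     k = 0
--     while (1 << k) < m:
--         k += 1
--
--     def visit(x0, y0, k, out):
--         if x0 >= cols or y0 >= rows:
--             return out
--         if k == 0:
--             out.append((x0, y0))
--             return out
--         h = 1 << (k - 1)
--         out = visit(x0, y0, k - 1, out)
--         out = visit(x0 + h, y0, k - 1, out)
--         out = visit(x0, y0 + h, k - 1, out)
--         return visit(x0 + h, y0 + h, k - 1, out)
--
--     return visit(0, 0, k, [])
-- ===== Notes on version B (the rewrite author's own statement) =====
-- stated objective: faster
-- what changed: Instead of computing a 64-bit Morton key per cell with a 32-iteration bit-spread loop and sorting the cells by that key, B emits the coordinates directly in Morton order by recursive Z-shaped quadrant subdivision of the power-of-two bounding square, pruning quadrants that lie outside the grid; no keys and no sort.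
import Mathlib
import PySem

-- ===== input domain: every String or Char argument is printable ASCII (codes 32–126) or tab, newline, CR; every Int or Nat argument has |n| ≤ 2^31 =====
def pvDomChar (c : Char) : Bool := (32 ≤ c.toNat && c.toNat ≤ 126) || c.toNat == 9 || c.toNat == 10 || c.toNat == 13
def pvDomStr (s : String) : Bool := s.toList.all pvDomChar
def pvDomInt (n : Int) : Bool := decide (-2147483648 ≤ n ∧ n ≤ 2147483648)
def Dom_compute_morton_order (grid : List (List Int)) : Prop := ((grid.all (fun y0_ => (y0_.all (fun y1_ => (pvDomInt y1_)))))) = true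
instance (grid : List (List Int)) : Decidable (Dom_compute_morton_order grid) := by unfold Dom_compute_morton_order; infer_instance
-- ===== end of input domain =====

-- B replaces A's per-cell 32-iteration Morton-key computation followed by a key sort with a
-- recursive Z-order quadrant traversal that emits the coordinates directly in Morton order.

-- ===== PORT A =====
-- split_bits: result |= ((value >> i) & 1) << (2*i) for i in range(32); i is always ≥ 0 here, so .toNat is exact
def split_bits (value : Int) : Int :=
  (PySem.List.pyRange 0 32 1).foldl
    (fun result i =>
      PySem.Int.bor result ((PySem.Int.band (value >>> i.toNat) 1) <<< (2 * i).toNat))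
    0

def interleave_bits (x y : Int) : Int :=
  PySem.Int.bor (split_bits x) (split_bits y <<< (1 : Nat))

def compute_morton_order (grid : List (List Int)) : List (Int × Int) :=
  let rows : Int := grid.length
  -- 'len(grid[0]) if rows > 0 else 0': the guard makes index 0 in range, so pyGetD is exact here
  let cols : Int := if rows > 0 then ((PySem.List.pyGetD grid 0 []).length : Int) else 0
  let morton_order : List (Int × Int × Int) :=
    (PySem.List.pyRange 0 rows 1).foldl
      (fun acc y =>
        (PySem.List.pyRange 0 cols 1).foldl
          (fun acc x => acc ++ [(interleave_bits x y, x, y)]) acc)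
      []
  (PySem.List.sorted morton_order (fun p => p.1) false).map (fun p => (p.2.1, p.2.2))

-- ===== PORT B =====
-- 'while (1 << k) < m: k += 1'
def find_k (m : Int) (k : Nat) : Nat :=
  if h : ((1 : Int) <<< k) < m then find_k m (k + 1) else k
termination_by m.toNat - 2 ^ k
decreasing_by
  have h2 : ((1 : Int) <<< k) = ((2 ^ k : Nat) : Int) := by
    rw [show ((1 : Int) <<< k) = (((1 <<< k : Nat)) : Int) from rfl, Nat.one_shiftLeft]
  have h3 : (2 : Nat) ^ k < 2 ^ (k + 1) := Nat.pow_lt_pow_right (by omega) (by omega)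
  rw [h2] at h
  omega

def visit (cols rows x0 y0 : Int) (k : Nat) (out : List (Int × Int)) : List (Int × Int) :=
  if x0 ≥ cols ∨ y0 ≥ rows then out
  else
    match k with
    | 0 => out ++ [(x0, y0)]
    | Nat.succ k' =>
      let h : Int := (1 : Int) <<< k'
      visit cols rows (x0 + h) (y0 + h) k'
        (visit cols rows x0 (y0 + h) k'
          (visit cols rows (x0 + h) y0 k'
            (visit cols rows x0 y0 k' out)))

def compute_morton_order_alt (grid : List (List Int)) : List (Int × Int) :=
  let rows : Int := grid.length
  let cols : Int := if rows > 0 then ((PySem.List.pyGetD grid 0 []).length : Int) else 0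
  let m : Int := if rows > cols then rows else cols
  visit cols rows 0 0 (find_k m 0) []

-- ===== PRECONDITION & SPEC =====
-- A computes each Morton key from only the low 32 bits of each coordinate, so on grids with
-- more than 2^32 rows or columns (lists far beyond anything a machine can materialise) duplicate
-- keys would make A's order an accidental artefact of sort stability; Pre_ excludes exactly those.
def Pre_compute_morton_order (grid : List (List Int)) : Prop :=
  grid.length ≤ 2 ^ 32 ∧ (grid.headD []).length ≤ 2 ^ 32
instance (grid : List (List Int)) : Decidable (Pre_compute_morton_order grid) := by
  unfold Pre_compute_morton_order; infer_instance

def pvWitness_compute_morton_order : List (List Int) := [[0, 0, 0], [0, 0, 0]]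

def Spec_compute_morton_order (grid : List (List Int)) (out : List (Int × Int)) : Prop := out = compute_morton_order_alt grid
instance (grid : List (List Int)) (out : List (Int × Int)) : Decidable (Spec_compute_morton_order grid out) := by unfold Spec_compute_morton_order; infer_instance

-- ===== CLAIM (what is proved, stated in full; the proofs are below) =====
def Claim_equal_compute_morton_order : Prop := ∀ (grid : List (List Int)), Dom_compute_morton_order grid → Pre_compute_morton_order grid → Spec_compute_morton_order grid (compute_morton_order grid)

-- ===== LEMMAS AND PROOFS =====

def bitv (n i : Nat) : Nat := n / 2 ^ i % 2
def S (j n : Nat) : Nat := (Finset.range j).sum (fun i => bitv n i * 4 ^ i)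
def keyN (x y : Nat) : Nat := S 32 x + 2 * S 32 y

theorem S_bound (j n : Nat) : 3 * S j n ≤ 4 ^ j - 1 := by
  induction j with
  | zero => simp [S]
  | succ j ih =>
    have h1 : S (j+1) n = S j n + bitv n j * 4 ^ j := by
      simp [S, Finset.sum_range_succ]
    have h2 : bitv n j ≤ 1 := by unfold bitv; omega
    have h3 : (4:Nat) ^ (j+1) = 4 * 4 ^ j := by ring
    have h4 : 0 < (4:Nat) ^ j := Nat.pow_pos (by omega)
    have h5 : bitv n j * 4 ^ j ≤ 4 ^ j := by
      calc bitv n j * 4 ^ j ≤ 1 * 4 ^ j := Nat.mul_le_mul_right _ h2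
      _ = 4 ^ j := by ring
    omega
theorem S_high (j m n : Nat) (hj : j ≤ m) (hn : n < 2 ^ j) : S m n = S j n := by
  unfold S
  rw [show m = j + (m - j) by omega, Finset.sum_range_add]
  have : ∀ i, bitv n (j + i) = 0 := by
    intro i
    have : n < 2 ^ (j + i) := lt_of_lt_of_le hn (Nat.pow_le_pow_right (by omega) (by omega))
    unfold bitv
    rw [Nat.div_eq_of_lt this]
  simp [this]
theorem S_split (j x b : Nat) (hj : j ≤ 32) (hx : x < 2 ^ j) (hb : b < 2 ^ (32 - j)) :
    S 32 (b * 2 ^ j + x) = 4 ^ j * S 32 b + S 32 x := by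
  have hsum : ∀ (f : Nat → Nat), (Finset.range 32).sum f
      = (Finset.range j).sum f + (Finset.range (32 - j)).sum (fun i => f (j + i)) := by
    intro f
    have h := Finset.sum_range_add f j (32 - j)
    rwa [show j + (32 - j) = 32 by omega] at h
  have hlow : ∀ i, i < j → bitv (b * 2 ^ j + x) i = bitv x i := by
    intro i hi
    unfold bitv
    have h1 : (2:Nat) ^ j = 2 ^ (j - i) * 2 ^ i := by
      rw [← pow_add]; congr 1; omega
    rw [h1, ← Nat.mul_assoc, Nat.add_comm, Nat.add_mul_div_right _ _ (Nat.pow_pos (by omega))]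
    have h2 : (2:Nat) ^ (j - i) = 2 * 2 ^ (j - i - 1) := by
      rw [← pow_succ']; congr 1; omega
    rw [h2, show b * (2 * 2 ^ (j - i - 1)) = 2 * (b * 2 ^ (j - i - 1)) by ring]
    omega
  have hhigh : ∀ i, bitv (b * 2 ^ j + x) (j + i) = bitv b i := by
    intro i
    unfold bitv
    rw [pow_add, ← Nat.div_div_eq_div_mul, Nat.mul_comm b,
        Nat.mul_add_div (Nat.pow_pos (by omega)), Nat.div_eq_of_lt hx, Nat.add_zero]
  unfold S
  rw [hsum]
  calc (Finset.range j).sum (fun i => bitv (b * 2 ^ j + x) i * 4 ^ i)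
        + (Finset.range (32 - j)).sum (fun i => bitv (b * 2 ^ j + x) (j + i) * 4 ^ (j + i))
      = (Finset.range j).sum (fun i => bitv x i * 4 ^ i)
        + 4 ^ j * (Finset.range (32 - j)).sum (fun i => bitv b i * 4 ^ i) := by
        rw [Finset.mul_sum]
        congr 1
        · exact Finset.sum_congr rfl (fun i hi => by rw [hlow i (Finset.mem_range.mp hi)])
        · exact Finset.sum_congr rfl (fun i _ => by rw [hhigh i, pow_add]; ring)
    _ = 4 ^ j * ((Finset.range 32).sum (fun i => bitv b i * 4 ^ i))
        + (Finset.range 32).sum (fun i => bitv x i * 4 ^ i) := by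
        have h1 : S 32 x = S j x := S_high j 32 x hj hx
        have h2 : S 32 b = S (32 - j) b := S_high (32 - j) 32 b (by omega) hb
        unfold S at h1 h2
        rw [← h1, ← h2]
        ring

theorem keyN_split (j x1 y1 qx qy : Nat) (hj : j ≤ 32) (hx : x1 < 2 ^ j) (hy : y1 < 2 ^ j)
    (hqx : qx < 2 ^ (32 - j)) (hqy : qy < 2 ^ (32 - j)) :
    keyN (qx * 2 ^ j + x1) (qy * 2 ^ j + y1) = 4 ^ j * keyN qx qy + keyN x1 y1 := by
  unfold keyN
  rw [S_split j x1 qx hj hx hqx, S_split j y1 qy hj hy hqy]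
  ring

theorem keyN_lt (j x y : Nat) (hj : j ≤ 32) (hx : x < 2 ^ j) (hy : y < 2 ^ j) : keyN x y < 4 ^ j := by
  unfold keyN
  have h1 := S_bound j x
  have h2 := S_bound j y
  have h3 : S 32 x = S j x := S_high j 32 x hj hx
  have h4 : S 32 y = S j y := S_high j 32 y hj hy
  have h5 : 0 < (4:Nat) ^ j := Nat.pow_pos (by omega)
  rw [h3, h4]
  omega

theorem foldN_eq_S (n : Nat) (m : Nat) :
    (List.range m).foldl (fun r i => r ||| ((n >>> i &&& 1) <<< (2 * i))) 0 = S m n := by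
  induction m with
  | zero => simp [S]
  | succ m ih =>
    rw [List.range_succ, List.foldl_append, ih]
    simp only [List.foldl_cons, List.foldl_nil]
    have hb : (n >>> m &&& 1) = bitv n m := by
      rw [Nat.shiftRight_eq_div_pow, Nat.and_one_is_mod]; rfl
    have h4 : (4:Nat) ^ m = 2 ^ (2 * m) := by
      rw [show (4:Nat) = 2 ^ 2 by norm_num, ← pow_mul]
    have h2 : S m n < 2 ^ (2 * m) := by
      rw [← h4]
      have := S_bound m n
      have h5 : 0 < (4:Nat) ^ m := Nat.pow_pos (by omega)
      omega
    have key := Nat.two_pow_add_eq_or_of_lt h2 (bitv n m)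
    rw [hb, Nat.shiftLeft_eq, Nat.lor_comm,
        show bitv n m * 2 ^ (2 * m) = 2 ^ (2 * m) * bitv n m by ring, ← key]
    rw [← h4]
    unfold S
    rw [Finset.sum_range_succ]
    ring

theorem foldl_cast_general (n : Nat) (l : List Nat) (a : Nat) :
    List.foldl (fun (result : Int) (k : Nat) =>
        PySem.Int.bor result ((PySem.Int.band ((n : Int) >>> ((k : Nat) : Int)) 1) <<< ((2 * k : Nat) : Int)))
      ((a : Nat) : Int) l
    = ((l.foldl (fun r i => r ||| ((n >>> i &&& 1) <<< (2 * i))) a : Nat) : Int) := by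
  induction l generalizing a with
  | nil => simp
  | cons k t ih =>
    simp only [List.foldl_cons]
    rw [show PySem.Int.bor ((a : Nat) : Int) ((PySem.Int.band ((n : Int) >>> ((k : Nat) : Int)) 1) <<< ((2 * k : Nat) : Int))
          = ((a ||| ((n >>> k &&& 1) <<< (2 * k)) : Nat) : Int) by
        rw [show ((n : Int) >>> ((k : Nat) : Int)) = ((n >>> k : Nat) : Int) by
              simp only [Int.shiftRight_natCast, Int.natCast_shiftRight],
            show ((1 : Int)) = (((1 : Nat)) : Int) from rfl, PySem.Int.band_natCast,
            show ((((n >>> k) &&& 1 : Nat)) : Int) <<< ((2 * k : Nat) : Int)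
              = (((n >>> k &&& 1) <<< (2 * k) : Nat) : Int) by
              simp only [Int.shiftLeft_natCast, Int.natCast_shiftLeft],
            PySem.Int.bor_natCast]]
    exact ih _

theorem split_bits_natCast (n : Nat) : split_bits (n : Int) = ((S 32 n : Nat) : Int) := by
  unfold split_bits
  rw [PySem.List.pyRange_one, show ((32 : Int) - 0).toNat = 32 by rfl, List.foldl_map]
  have e : (fun (result : Int) (k : Nat) =>
        PySem.Int.bor result ((PySem.Int.band ((n : Int) >>> (((0 + (k : Int)).toNat : Nat) : Int)) 1) <<< (((2 * (0 + (k : Int))).toNat : Nat) : Int)))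
      = (fun (result : Int) (k : Nat) =>
        PySem.Int.bor result ((PySem.Int.band ((n : Int) >>> ((k : Nat) : Int)) 1) <<< ((2 * k : Nat) : Int))) := by
    funext r k
    rw [zero_add, Int.toNat_natCast, show ((2 * (k : Int)).toNat) = 2 * k by omega]
  rw [e, show (0 : Int) = ((0 : Nat) : Int) from rfl, foldl_cast_general n (List.range 32) 0,
      foldN_eq_S n 32]

theorem S_head (j n : Nat) : S (j + 1) n = n % 2 + 4 * S j (n / 2) := by
  unfold S
  have hb0 : bitv n 0 = n % 2 := by unfold bitv; simp
  have hbs : ∀ i, bitv n (i + 1) = bitv (n / 2) i := by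
    intro i
    unfold bitv
    rw [pow_succ', ← Nat.div_div_eq_div_mul]
  rw [Finset.sum_range_succ', hb0]
  simp only [hbs, pow_zero, mul_one]
  rw [add_comm, Finset.mul_sum]
  congr 1
  exact Finset.sum_congr rfl (fun i _ => by rw [pow_succ']; ring)

theorem S_lor_two_mul (j : Nat) : ∀ x y : Nat, S j x ||| 2 * S j y = S j x + 2 * S j y := by
  induction j with
  | zero => simp [S]
  | succ j ih =>
    intro x y
    rw [S_head j x, S_head j y]
    have ex : x % 2 + 4 * S j (x / 2) = Nat.bit (x % 2 == 1) (Nat.bit false (S j (x / 2))) := by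
      rcases Nat.mod_two_eq_zero_or_one x with h | h <;> simp [Nat.bit, h] <;> omega
    have ey : 2 * (y % 2 + 4 * S j (y / 2)) = Nat.bit false (Nat.bit (y % 2 == 1) (2 * S j (y / 2))) := by
      rcases Nat.mod_two_eq_zero_or_one y with h | h <;> simp [Nat.bit, h] <;> omega
    rw [ex, ey, Nat.lor_bit, Nat.lor_bit, ih (x / 2) (y / 2)]
    rcases Nat.mod_two_eq_zero_or_one x with hx | hx <;>
      rcases Nat.mod_two_eq_zero_or_one y with hy | hy <;>
        simp [Nat.bit, hx, hy] <;> omega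

theorem interleave_bits_natCast (x y : Nat) :
    interleave_bits (x : Int) (y : Int) = ((keyN x y : Nat) : Int) := by
  unfold interleave_bits
  rw [split_bits_natCast, split_bits_natCast,
      show (((S 32 y : Nat) : Int) <<< (1 : Nat)) = ((S 32 y <<< 1 : Nat) : Int) from rfl,
      show (S 32 y <<< 1) = 2 * S 32 y by rw [Nat.shiftLeft_eq]; ring,
      PySem.Int.bor_natCast, S_lor_two_mul 32 x y]
  rfl

theorem one_shl (k : Nat) : ((1 : Int) <<< k) = ((2 ^ k : Nat) : Int) := by
  rw [show ((1 : Int) <<< k) = (((1 <<< k : Nat)) : Int) from rfl, Nat.one_shiftLeft]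

theorem visit_acc (cols rows : Int) (k : Nat) :
    ∀ (x0 y0 : Int) (out : List (Int × Int)),
      visit cols rows x0 y0 k out = out ++ visit cols rows x0 y0 k [] := by
  induction k with
  | zero =>
    intro x0 y0 out
    unfold visit
    split_ifs <;> simp
  | succ k ih =>
    intro x0 y0 out
    unfold visit
    split_ifs with hp
    · simp
    · simp only []
      rw [ih (x0 + ((1 : Int) <<< k)) (y0 + ((1 : Int) <<< k))
            (visit cols rows x0 (y0 + ((1 : Int) <<< k)) k (visit cols rows (x0 + ((1 : Int) <<< k)) y0 k (visit cols rows x0 y0 k out))),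
          ih x0 (y0 + ((1 : Int) <<< k)) (visit cols rows (x0 + ((1 : Int) <<< k)) y0 k (visit cols rows x0 y0 k out)),
          ih (x0 + ((1 : Int) <<< k)) y0 (visit cols rows x0 y0 k out),
          ih x0 y0 out]
      conv_rhs => rw [ih (x0 + ((1 : Int) <<< k)) (y0 + ((1 : Int) <<< k))
            (visit cols rows x0 (y0 + ((1 : Int) <<< k)) k (visit cols rows (x0 + ((1 : Int) <<< k)) y0 k (visit cols rows x0 y0 k []))),
          ih x0 (y0 + ((1 : Int) <<< k)) (visit cols rows (x0 + ((1 : Int) <<< k)) y0 k (visit cols rows x0 y0 k [])),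
          ih (x0 + ((1 : Int) <<< k)) y0 (visit cols rows x0 y0 k [])]
      simp [List.append_assoc]

theorem visit_mem (cols rows : Int) (j : Nat) :
    ∀ (qx qy : Nat) (p : Int × Int),
    (p ∈ visit cols rows ((qx * 2 ^ j : Nat) : Int) ((qy * 2 ^ j : Nat) : Int) j [] ↔
      ∃ x y : Nat, p = ((x : Int), (y : Int)) ∧
        qx * 2 ^ j ≤ x ∧ x < (qx + 1) * 2 ^ j ∧ (x : Int) < cols ∧
        qy * 2 ^ j ≤ y ∧ y < (qy + 1) * 2 ^ j ∧ (y : Int) < rows) := by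
  induction j with
  | zero =>
    intro qx qy p
    simp only [pow_zero, Nat.mul_one]
    unfold visit
    split_ifs with hp
    · simp only [List.not_mem_nil, false_iff]
      rintro ⟨x, y, rfl, h1, h2, h3, h4, h5, h6⟩
      have hx : x = qx := by omega
      have hy : y = qy := by omega
      subst hx; subst hy
      rcases hp with hp | hp <;> omega
    · push_neg at hp
      simp only [List.nil_append, List.mem_singleton]
      constructor
      · rintro rfl
        exact ⟨qx, qy, rfl, by omega, by omega, hp.1, by omega, by omega, hp.2⟩
      · rintro ⟨x, y, rfl, h1, h2, h3, h4, h5, h6⟩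
        have hx : x = qx := by omega
        have hy : y = qy := by omega
        subst hx; subst hy; rfl
  | succ j ih =>
    intro qx qy p
    have hA : (2:Nat) ^ (j + 1) = 2 * 2 ^ j := by rw [pow_succ]; ring
    have ex0 : (qx * 2 ^ (j + 1)) = (2 * qx) * 2 ^ j := by rw [pow_succ]; ring
    have ey0 : (qy * 2 ^ (j + 1)) = (2 * qy) * 2 ^ j := by rw [pow_succ]; ring
    have ex1 : (((qx * 2 ^ (j + 1) : Nat)) : Int) + ((1 : Int) <<< j) = (((2 * qx + 1) * 2 ^ j : Nat) : Int) := by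
      rw [one_shl]; push_cast; rw [pow_succ]; ring
    have ey1 : (((qy * 2 ^ (j + 1) : Nat)) : Int) + ((1 : Int) <<< j) = (((2 * qy + 1) * 2 ^ j : Nat) : Int) := by
      rw [one_shl]; push_cast; rw [pow_succ]; ring
    rw [show visit cols rows ((qx * 2 ^ (j+1) : Nat) : Int) ((qy * 2 ^ (j+1) : Nat) : Int) (j+1) [] =
        if ((qx * 2 ^ (j+1) : Nat) : Int) ≥ cols ∨ ((qy * 2 ^ (j+1) : Nat) : Int) ≥ rows then []
        else
          visit cols rows (((qx * 2 ^ (j+1) : Nat) : Int) + ((1:Int) <<< j)) ((((qy * 2 ^ (j+1) : Nat)) : Int) + ((1:Int) <<< j)) j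
            (visit cols rows ((qx * 2 ^ (j+1) : Nat) : Int) ((((qy * 2 ^ (j+1) : Nat)) : Int) + ((1:Int) <<< j)) j
              (visit cols rows (((qx * 2 ^ (j+1) : Nat) : Int) + ((1:Int) <<< j)) ((qy * 2 ^ (j+1) : Nat) : Int) j
                (visit cols rows ((qx * 2 ^ (j+1) : Nat) : Int) ((qy * 2 ^ (j+1) : Nat) : Int) j [])))
        from by rw [visit]]
    split_ifs with hp
    · simp only [List.not_mem_nil, false_iff]
      rintro ⟨x, y, rfl, h1, h2, h3, h4, h5, h6⟩
      rcases hp with hp | hp <;> omega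
    · rw [ex1, ey1]
      rw [show ((qx * 2 ^ (j+1) : Nat) : Int) = (((2 * qx) * 2 ^ j : Nat) : Int) from by rw [ex0],
          show ((qy * 2 ^ (j+1) : Nat) : Int) = (((2 * qy) * 2 ^ j : Nat) : Int) from by rw [ey0]]
      rw [visit_acc cols rows j _ _ (visit cols rows _ _ j (visit cols rows _ _ j (visit cols rows _ _ j []))),
          visit_acc cols rows j _ _ (visit cols rows _ _ j (visit cols rows _ _ j [])),
          visit_acc cols rows j _ _ (visit cols rows _ _ j [])]
      simp only [List.mem_append]
      rw [ih (2 * qx) (2 * qy) p, ih (2 * qx + 1) (2 * qy) p, ih (2 * qx) (2 * qy + 1) p,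
          ih (2 * qx + 1) (2 * qy + 1) p]
      rw [show ((2 * qx + 1 + 1) * 2 ^ j) = (2 * qx + 2) * 2 ^ j from by ring,
          show ((2 * qy + 1 + 1) * 2 ^ j) = (2 * qy + 2) * 2 ^ j from by ring]
      have m0 : (2 * qx) * 2 ^ j + 2 ^ j = (2 * qx + 1) * 2 ^ j := by ring
      have m1 : (2 * qx + 1) * 2 ^ j + 2 ^ j = (2 * qx + 2) * 2 ^ j := by ring
      have m2 : (2 * qy) * 2 ^ j + 2 ^ j = (2 * qy + 1) * 2 ^ j := by ring
      have m3 : (2 * qy + 1) * 2 ^ j + 2 ^ j = (2 * qy + 2) * 2 ^ j := by ring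
      have m4 : qx * 2 ^ (j + 1) = (2 * qx) * 2 ^ j := ex0
      have m5 : (qx + 1) * 2 ^ (j + 1) = (2 * qx + 2) * 2 ^ j := by rw [pow_succ]; ring
      have m6 : qy * 2 ^ (j + 1) = (2 * qy) * 2 ^ j := ey0
      have m7 : (qy + 1) * 2 ^ (j + 1) = (2 * qy + 2) * 2 ^ j := by rw [pow_succ]; ring
      constructor
      · rintro (((h | h) | h) | h) <;>
          · obtain ⟨x, y, rfl, h1, h2, h3, h4, h5, h6⟩ := h
            exact ⟨x, y, rfl, by omega, by omega, h3, by omega, by omega, h6⟩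
      · rintro ⟨x, y, rfl, h1, h2, h3, h4, h5, h6⟩
        by_cases cx : x < (2 * qx + 1) * 2 ^ j <;> by_cases cy : y < (2 * qy + 1) * 2 ^ j
        · exact Or.inl (Or.inl (Or.inl ⟨x, y, rfl, by omega, by omega, h3, by omega, by omega, h6⟩))
        · exact Or.inl (Or.inr ⟨x, y, rfl, by omega, by omega, h3, by omega, by omega, h6⟩)
        · exact Or.inl (Or.inl (Or.inr ⟨x, y, rfl, by omega, by omega, h3, by omega, by omega, h6⟩))
        · exact Or.inr ⟨x, y, rfl, by omega, by omega, h3, by omega, by omega, h6⟩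

theorem pow2_sub_split (j : Nat) (hj : j ≤ 32) : (2:Nat) ^ 32 = 2 ^ (32 - j) * 2 ^ j := by
  rw [← pow_add]; congr 1; omega

theorem quad_lt (j qx : Nat) (hj : j ≤ 32) (hqx : (qx + 1) * 2 ^ j ≤ 2 ^ 32) :
    qx < 2 ^ (32 - j) := by
  have h1 := pow2_sub_split j hj
  have h2 : (qx + 1) * 2 ^ j ≤ 2 ^ (32 - j) * 2 ^ j := by omega
  have h3 : qx + 1 ≤ 2 ^ (32 - j) := Nat.le_of_mul_le_mul_right h2 (Nat.pow_pos (by omega))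
  omega

theorem visit_key_bound (cols rows : Int) (j qx qy : Nat) (hj : j ≤ 32)
    (hqx : (qx + 1) * 2 ^ j ≤ 2 ^ 32) (hqy : (qy + 1) * 2 ^ j ≤ 2 ^ 32) :
    ∀ p ∈ visit cols rows ((qx * 2 ^ j : Nat) : Int) ((qy * 2 ^ j : Nat) : Int) j [],
      ∃ K : Nat, interleave_bits p.1 p.2 = (K : Int) ∧
        4 ^ j * keyN qx qy ≤ K ∧ K < 4 ^ j * keyN qx qy + 4 ^ j := by
  intro p hp
  rw [visit_mem] at hp
  obtain ⟨x, y, rfl, h1, h2, h3, h4, h5, h6⟩ := hp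
  have hqx' : qx < 2 ^ (32 - j) := quad_lt j qx hj hqx
  have hqy' : qy < 2 ^ (32 - j) := quad_lt j qy hj hqy
  have ebx : (qx + 1) * 2 ^ j = qx * 2 ^ j + 2 ^ j := by ring
  have eby : (qy + 1) * 2 ^ j = qy * 2 ^ j + 2 ^ j := by ring
  have ex : x = qx * 2 ^ j + (x - qx * 2 ^ j) := by omega
  have ey : y = qy * 2 ^ j + (y - qy * 2 ^ j) := by omega
  have hx1 : x - qx * 2 ^ j < 2 ^ j := by omega
  have hy1 : y - qy * 2 ^ j < 2 ^ j := by omega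
  refine ⟨keyN x y, interleave_bits_natCast x y, ?_, ?_⟩
  · rw [ex, ey, keyN_split j _ _ qx qy hj hx1 hy1 hqx' hqy']
    omega
  · rw [ex, ey, keyN_split j _ _ qx qy hj hx1 hy1 hqx' hqy']
    have := keyN_lt j _ _ hj hx1 hy1
    omega

theorem key_lt_of_bounds (j Kp Kq B c c' : Nat) (hc : c < c')
    (h1 : Kp < 4 ^ j * (4 * B + c) + 4 ^ j) (h2 : 4 ^ j * (4 * B + c') ≤ Kq) : Kp < Kq := by
  have h3 : 4 ^ j * (4 * B + c) + 4 ^ j ≤ 4 ^ j * (4 * B + c') := by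
    calc 4 ^ j * (4 * B + c) + 4 ^ j = 4 ^ j * ((4 * B + c) + 1) := by ring
    _ ≤ 4 ^ j * (4 * B + c') := Nat.mul_le_mul_left _ (by omega)
  omega

theorem S32_zero : S 32 0 = 0 := by
  rw [S_high 0 32 0 (by omega) (by norm_num)]
  simp [S]

theorem S32_one : S 32 1 = 1 := by
  rw [S_high 1 32 1 (by omega) (by norm_num)]
  simp [S, bitv]

theorem visit_pairwise (cols rows : Int) : ∀ (j qx qy : Nat), j ≤ 32 →
    (qx + 1) * 2 ^ j ≤ 2 ^ 32 → (qy + 1) * 2 ^ j ≤ 2 ^ 32 →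
    (visit cols rows ((qx * 2 ^ j : Nat) : Int) ((qy * 2 ^ j : Nat) : Int) j []).Pairwise
      (fun p q => interleave_bits p.1 p.2 < interleave_bits q.1 q.2) := by
  intro j
  induction j with
  | zero =>
    intro qx qy _ _ _
    unfold visit
    split_ifs <;> simp
  | succ j ih =>
    intro qx qy hj hqx hqy
    have hj' : j ≤ 32 := by omega
    have hq2 : (2:Nat) ^ (j + 1) = 2 * 2 ^ j := by rw [pow_succ]; ring
    have ex0 : (qx * 2 ^ (j + 1)) = (2 * qx) * 2 ^ j := by rw [pow_succ]; ring
    have ey0 : (qy * 2 ^ (j + 1)) = (2 * qy) * 2 ^ j := by rw [pow_succ]; ring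
    have ex1 : (((qx * 2 ^ (j + 1) : Nat)) : Int) + ((1 : Int) <<< j) = (((2 * qx + 1) * 2 ^ j : Nat) : Int) := by
      rw [one_shl]; push_cast; rw [pow_succ]; ring
    have ey1 : (((qy * 2 ^ (j + 1) : Nat)) : Int) + ((1 : Int) <<< j) = (((2 * qy + 1) * 2 ^ j : Nat) : Int) := by
      rw [one_shl]; push_cast; rw [pow_succ]; ring
    -- child quadrant size bounds
    have hcx2 : (2 * qx + 2) * 2 ^ j ≤ 2 ^ 32 := by
      have : (2 * qx + 2) * 2 ^ j = (qx + 1) * 2 ^ (j + 1) := by rw [pow_succ]; ring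
      omega
    have hcx1 : (2 * qx + 1 + 1) * 2 ^ j ≤ 2 ^ 32 := by
      have : (2 * qx + 1 + 1) * 2 ^ j = (2 * qx + 2) * 2 ^ j := by ring
      omega
    have hcx0 : (2 * qx + 1) * 2 ^ j ≤ 2 ^ 32 := by
      have : (2 * qx + 1) * 2 ^ j ≤ (2 * qx + 2) * 2 ^ j := Nat.mul_le_mul_right _ (by omega)
      omega
    have hcy2 : (2 * qy + 2) * 2 ^ j ≤ 2 ^ 32 := by
      have : (2 * qy + 2) * 2 ^ j = (qy + 1) * 2 ^ (j + 1) := by rw [pow_succ]; ring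
      omega
    have hcy1 : (2 * qy + 1 + 1) * 2 ^ j ≤ 2 ^ 32 := by
      have : (2 * qy + 1 + 1) * 2 ^ j = (2 * qy + 2) * 2 ^ j := by ring
      omega
    have hcy0 : (2 * qy + 1) * 2 ^ j ≤ 2 ^ 32 := by
      have : (2 * qy + 1) * 2 ^ j ≤ (2 * qy + 2) * 2 ^ j := Nat.mul_le_mul_right _ (by omega)
      omega
    -- child base keys
    have hqx31 : qx < 2 ^ 31 := by
      have h1 : (qx + 1) * 2 ≤ (qx + 1) * 2 ^ (j + 1) :=
        Nat.mul_le_mul_left _ (by calc (2:Nat) = 2 ^ 1 := by norm_num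
                                    _ ≤ 2 ^ (j + 1) := Nat.pow_le_pow_right (by omega) (by omega))
      have h2 : (2:Nat) ^ 32 = 2 ^ 31 * 2 := by norm_num
      have h3 : (qx + 1) * 2 ≤ 2 ^ 31 * 2 := by omega
      have h4 := Nat.le_of_mul_le_mul_right h3 (by omega : 0 < 2)
      omega
    have hqy31 : qy < 2 ^ 31 := by
      have h1 : (qy + 1) * 2 ≤ (qy + 1) * 2 ^ (j + 1) :=
        Nat.mul_le_mul_left _ (by calc (2:Nat) = 2 ^ 1 := by norm_num
                                    _ ≤ 2 ^ (j + 1) := Nat.pow_le_pow_right (by omega) (by omega))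
      have h2 : (2:Nat) ^ 32 = 2 ^ 31 * 2 := by norm_num
      have h3 : (qy + 1) * 2 ≤ 2 ^ 31 * 2 := by omega
      have h4 := Nat.le_of_mul_le_mul_right h3 (by omega : 0 < 2)
      omega
    have h31 : (2:Nat) ^ (32 - 1) = 2 ^ 31 := by norm_num
    have key00 : keyN (2 * qx) (2 * qy) = 4 * keyN qx qy + 0 := by
      have h := keyN_split 1 0 0 qx qy (by omega) (by norm_num) (by norm_num) (by omega) (by omega)
      rw [show qx * 2 ^ 1 + 0 = 2 * qx by ring, show qy * 2 ^ 1 + 0 = 2 * qy by ring] at h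
      rw [h, show keyN 0 0 = 0 by unfold keyN; rw [S32_zero]]
      norm_num
    have key10 : keyN (2 * qx + 1) (2 * qy) = 4 * keyN qx qy + 1 := by
      have h := keyN_split 1 1 0 qx qy (by omega) (by norm_num) (by norm_num) (by omega) (by omega)
      rw [show qx * 2 ^ 1 + 1 = 2 * qx + 1 by ring, show qy * 2 ^ 1 + 0 = 2 * qy by ring] at h
      rw [h, show keyN 1 0 = 1 by unfold keyN; rw [S32_zero, S32_one]]
      norm_num
    have key01 : keyN (2 * qx) (2 * qy + 1) = 4 * keyN qx qy + 2 := by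
      have h := keyN_split 1 0 1 qx qy (by omega) (by norm_num) (by norm_num) (by omega) (by omega)
      rw [show qx * 2 ^ 1 + 0 = 2 * qx by ring, show qy * 2 ^ 1 + 1 = 2 * qy + 1 by ring] at h
      rw [h, show keyN 0 1 = 2 by unfold keyN; rw [S32_zero, S32_one]]
      norm_num
    have key11 : keyN (2 * qx + 1) (2 * qy + 1) = 4 * keyN qx qy + 3 := by
      have h := keyN_split 1 1 1 qx qy (by omega) (by norm_num) (by norm_num) (by omega) (by omega)
      rw [show qx * 2 ^ 1 + 1 = 2 * qx + 1 by ring, show qy * 2 ^ 1 + 1 = 2 * qy + 1 by ring] at h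
      rw [h, show keyN 1 1 = 3 by unfold keyN; rw [S32_one]]
      norm_num
    rw [show visit cols rows ((qx * 2 ^ (j+1) : Nat) : Int) ((qy * 2 ^ (j+1) : Nat) : Int) (j+1) [] =
        if ((qx * 2 ^ (j+1) : Nat) : Int) ≥ cols ∨ ((qy * 2 ^ (j+1) : Nat) : Int) ≥ rows then []
        else
          visit cols rows (((qx * 2 ^ (j+1) : Nat) : Int) + ((1:Int) <<< j)) ((((qy * 2 ^ (j+1) : Nat)) : Int) + ((1:Int) <<< j)) j
            (visit cols rows ((qx * 2 ^ (j+1) : Nat) : Int) ((((qy * 2 ^ (j+1) : Nat)) : Int) + ((1:Int) <<< j)) j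
              (visit cols rows (((qx * 2 ^ (j+1) : Nat) : Int) + ((1:Int) <<< j)) ((qy * 2 ^ (j+1) : Nat) : Int) j
                (visit cols rows ((qx * 2 ^ (j+1) : Nat) : Int) ((qy * 2 ^ (j+1) : Nat) : Int) j [])))
        from by rw [visit]]
    split_ifs with hp
    · exact List.Pairwise.nil
    · rw [ex1, ey1]
      rw [show ((qx * 2 ^ (j+1) : Nat) : Int) = (((2 * qx) * 2 ^ j : Nat) : Int) from by rw [ex0],
          show ((qy * 2 ^ (j+1) : Nat) : Int) = (((2 * qy) * 2 ^ j : Nat) : Int) from by rw [ey0]]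
      rw [visit_acc cols rows j _ _ (visit cols rows _ _ j (visit cols rows _ _ j (visit cols rows _ _ j []))),
          visit_acc cols rows j _ _ (visit cols rows _ _ j (visit cols rows _ _ j [])),
          visit_acc cols rows j _ _ (visit cols rows _ _ j [])]
      have KB1 := visit_key_bound cols rows j (2 * qx) (2 * qy) hj' hcx0 hcy0
      have KB2 := visit_key_bound cols rows j (2 * qx + 1) (2 * qy) hj' hcx1 hcy0
      have KB3 := visit_key_bound cols rows j (2 * qx) (2 * qy + 1) hj' hcx0 hcy1
      have KB4 := visit_key_bound cols rows j (2 * qx + 1) (2 * qy + 1) hj' hcx1 hcy1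
      have P1 := ih (2 * qx) (2 * qy) hj' hcx0 hcy0
      have P2 := ih (2 * qx + 1) (2 * qy) hj' hcx1 hcy0
      have P3 := ih (2 * qx) (2 * qy + 1) hj' hcx0 hcy1
      have P4 := ih (2 * qx + 1) (2 * qy + 1) hj' hcx1 hcy1
      rw [List.pairwise_append, List.pairwise_append, List.pairwise_append]
      refine ⟨⟨⟨P1, P2, ?_⟩, P3, ?_⟩, P4, ?_⟩
      · intro p hp1 q hq1
        obtain ⟨Kp, ep, _, hpu⟩ := KB1 p hp1
        obtain ⟨Kq, eq', hql, _⟩ := KB2 q hq1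
        rw [ep, eq']
        rw [key00] at hpu
        rw [key10] at hql
        exact_mod_cast key_lt_of_bounds j Kp Kq (keyN qx qy) 0 1 (by omega) hpu hql
      · intro p hp1 q hq1
        obtain ⟨Kq, eq', hql, _⟩ := KB3 q hq1
        rw [key01] at hql
        rcases List.mem_append.mp hp1 with hm | hm
        · obtain ⟨Kp, ep, _, hpu⟩ := KB1 p hm
          rw [ep, eq']
          rw [key00] at hpu
          exact_mod_cast key_lt_of_bounds j Kp Kq (keyN qx qy) 0 2 (by omega) hpu hql
        · obtain ⟨Kp, ep, _, hpu⟩ := KB2 p hm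
          rw [ep, eq']
          rw [key10] at hpu
          exact_mod_cast key_lt_of_bounds j Kp Kq (keyN qx qy) 1 2 (by omega) hpu hql
      · intro p hp1 q hq1
        obtain ⟨Kq, eq', hql, _⟩ := KB4 q hq1
        rw [key11] at hql
        rcases List.mem_append.mp hp1 with hm | hm
        · rcases List.mem_append.mp hm with hm2 | hm2
          · obtain ⟨Kp, ep, _, hpu⟩ := KB1 p hm2
            rw [ep, eq']
            rw [key00] at hpu
            exact_mod_cast key_lt_of_bounds j Kp Kq (keyN qx qy) 0 3 (by omega) hpu hql
          · obtain ⟨Kp, ep, _, hpu⟩ := KB2 p hm2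
            rw [ep, eq']
            rw [key10] at hpu
            exact_mod_cast key_lt_of_bounds j Kp Kq (keyN qx qy) 1 3 (by omega) hpu hql
        · obtain ⟨Kp, ep, _, hpu⟩ := KB3 p hm
          rw [ep, eq']
          rw [key01] at hpu
          exact_mod_cast key_lt_of_bounds j Kp Kq (keyN qx qy) 2 3 (by omega) hpu hql

theorem find_k_le (m : Int) : ∀ (k : Nat), m ≤ ((2 ^ 32 : Nat) : Int) → k ≤ 32 →
    find_k m k ≤ 32 := by
  intro k
  fun_induction find_k m k with
  | case1 k h ih =>
    intro hm hk
    have h2 : ((1 : Int) <<< k) = ((2 ^ k : Nat) : Int) := one_shl k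
    rw [h2] at h
    have : k < 32 := by
      by_contra hc
      have : (32:Nat) ≤ k := by omega
      have : (2:Nat) ^ 32 ≤ 2 ^ k := Nat.pow_le_pow_right (by omega) this
      omega
    exact ih hm (by omega)
  | case2 k h =>
    intro _ hk
    exact hk

theorem find_k_ge (m : Int) : ∀ (k : Nat), m ≤ ((2 ^ (find_k m k) : Nat) : Int) := by
  intro k
  fun_induction find_k m k with
  | case1 k h ih => exact ih
  | case2 k h =>
    rw [one_shl] at h
    omega

def tri (p : Int × Int) : Int × Int × Int := (interleave_bits p.1 p.2, p.1, p.2)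

theorem coordsA_nodup (a b : Int) :
    ((PySem.List.pyRange 0 b 1).flatMap
      (fun y => (PySem.List.pyRange 0 a 1).map (fun x => ((x, y) : Int × Int)))).Nodup := by
  have h : ((PySem.List.pyRange 0 b 1).flatMap
      (fun y => (PySem.List.pyRange 0 a 1).map (fun x => ((x, y) : Int × Int))))
      = ((PySem.List.pyRange 0 b 1) ×ˢ (PySem.List.pyRange 0 a 1)).map Prod.swap := by
    rw [show ((PySem.List.pyRange 0 b 1) ×ˢ (PySem.List.pyRange 0 a 1))
          = (PySem.List.pyRange 0 b 1).flatMap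
              (fun y => (PySem.List.pyRange 0 a 1).map (fun x => (y, x))) from rfl,
        List.map_flatMap]
    simp [List.map_map]
    rfl
  rw [h]
  exact ((PySem.List.nodup_pyRange_one 0 b).product (PySem.List.nodup_pyRange_one 0 a)).map
    (fun _ _ h => Prod.swap_injective h)

set_option maxRecDepth 8192 in
theorem core (R CN k : Nat) (h2k : (2:Nat) ^ k ≤ 2 ^ 32) (hk32 : k ≤ 32)
    (hRk : R ≤ 2 ^ k) (hCk : CN ≤ 2 ^ k) :
    (PySem.List.sorted
       ((PySem.List.pyRange 0 (R : Int) 1).foldl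
         (fun acc y => (PySem.List.pyRange 0 (CN : Int) 1).foldl
            (fun acc x => acc ++ [(interleave_bits x y, x, y)]) acc) [])
       (fun p => p.1) false).map (fun p => (p.2.1, p.2.2))
    = visit (CN : Int) (R : Int) 0 0 k [] := by
  have hT : (PySem.List.pyRange 0 (R:Int) 1).foldl
      (fun acc y => (PySem.List.pyRange 0 (CN:Int) 1).foldl
        (fun acc x => acc ++ [(interleave_bits x y, x, y)]) acc) []
      = ((PySem.List.pyRange 0 (R:Int) 1).flatMap
          (fun y => (PySem.List.pyRange 0 (CN:Int) 1).map (fun x => ((x, y) : Int × Int)))).map tri := by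
    have h1 : (PySem.List.pyRange 0 (R:Int) 1).foldl
          (fun acc y => (PySem.List.pyRange 0 (CN:Int) 1).foldl
            (fun acc x => acc ++ [(interleave_bits x y, x, y)]) acc) []
        = [] ++ (PySem.List.pyRange 0 (R:Int) 1).flatMap
            (fun y => (PySem.List.pyRange 0 (CN:Int) 1).map (fun x => (interleave_bits x y, x, y))) := by
      rw [show (fun (acc : List (Int × Int × Int)) (y : Int) =>
            (PySem.List.pyRange 0 (CN:Int) 1).foldl
              (fun acc x => acc ++ [(interleave_bits x y, x, y)]) acc)
          = (fun acc y => acc ++ (PySem.List.pyRange 0 (CN:Int) 1).map (fun x => (interleave_bits x y, x, y))) from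
          funext (fun acc => funext (fun y => PySem.List.foldl_append_singleton_eq_map _ _ acc))]
      exact PySem.List.foldl_append_eq_flatMap _ _ []
    rw [h1]
    simp only [List.nil_append, List.map_flatMap, List.map_map]
    rfl
  -- corner-normalised instances of the visit lemmas
  have hcorner : (((0 * 2 ^ k : Nat)) : Int) = (0 : Int) := by simp
  have hq : (0 + 1) * 2 ^ k ≤ 2 ^ 32 := by omega
  have hpair := visit_pairwise (CN : Int) (R : Int) k 0 0 hk32 hq hq
  rw [hcorner] at hpair
  have hmem := fun (p : Int × Int) => visit_mem (CN : Int) (R : Int) k 0 0 p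
  rw [hcorner] at hmem
  -- E is nodup
  have hEnodup : (visit (CN : Int) (R : Int) 0 0 k []).Nodup := by
    refine hpair.imp ?_
    intro a b hlt heq
    rw [heq] at hlt
    exact lt_irrefl _ hlt
  -- E has the same members as A's row-major coordinate list
  have hmemiff : ∀ p : Int × Int,
      p ∈ visit (CN : Int) (R : Int) 0 0 k [] ↔
      p ∈ (PySem.List.pyRange 0 (R:Int) 1).flatMap
          (fun y => (PySem.List.pyRange 0 (CN:Int) 1).map (fun x => ((x, y) : Int × Int))) := by
    intro p
    rw [hmem p]
    simp only [List.mem_flatMap, List.mem_map, PySem.List.mem_pyRange_one]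
    constructor
    · rintro ⟨x, y, rfl, h1, h2, h3, h4, h5, h6⟩
      exact ⟨(y : Int), ⟨by omega, h6⟩, (x : Int), ⟨by omega, h3⟩, rfl⟩
    · rintro ⟨y, ⟨hy0, hyR⟩, x, ⟨hx0, hxC⟩, rfl⟩
      refine ⟨x.toNat, y.toNat, by simp [hx0, hy0], by omega, ?_, ?_, by omega, ?_, ?_⟩
      · have : x.toNat < CN := by omega
        omega
      · rw [Int.toNat_of_nonneg hx0]; exact hxC
      · have : y.toNat < R := by omega
        omega
      · rw [Int.toNat_of_nonneg hy0]; exact hyR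
  have hperm : ((visit (CN : Int) (R : Int) 0 0 k []).map tri).Perm
      (((PySem.List.pyRange 0 (R:Int) 1).flatMap
        (fun y => (PySem.List.pyRange 0 (CN:Int) 1).map (fun x => ((x, y) : Int × Int)))).map tri) :=
    ((List.perm_ext_iff_of_nodup hEnodup (coordsA_nodup (CN : Int) (R : Int))).mpr hmemiff).map tri
  have hpair2 : (((visit (CN : Int) (R : Int) 0 0 k []).map tri)).Pairwise
      (fun a b => (fun (p : Int × Int × Int) => p.1) a < (fun (p : Int × Int × Int) => p.1) b) :=
    List.pairwise_map.mpr hpair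
  rw [hT]
  trans (List.map (fun (p : Int × Int × Int) => (p.2.1, p.2.2)) ((visit (CN : Int) (R : Int) 0 0 k []).map tri))
  · exact congrArg _ (PySem.List.sorted_eq_of_perm_of_pairwise_lt _ _ _ hperm hpair2)
  · rw [List.map_map]
    have hid : ((fun (p : Int × Int × Int) => (p.2.1, p.2.2)) ∘ tri) = id := by
      funext p
      rfl
    rw [hid, List.map_id]

theorem glue (R Cn : Nat) (hR : R ≤ 2 ^ 32) (hCn : Cn ≤ 2 ^ 32) :
    (PySem.List.sorted
       ((PySem.List.pyRange 0 (R : Int) 1).foldl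
         (fun acc y => (PySem.List.pyRange 0 (if (R : Int) > 0 then (Cn : Int) else 0) 1).foldl
            (fun acc x => acc ++ [(interleave_bits x y, x, y)]) acc) [])
       (fun p => p.1) false).map (fun p => (p.2.1, p.2.2))
    = visit (if (R : Int) > 0 then (Cn : Int) else 0) (R : Int) 0 0
        (find_k (if (R : Int) > (if (R : Int) > 0 then (Cn : Int) else 0)
                 then (R : Int) else (if (R : Int) > 0 then (Cn : Int) else 0)) 0) [] := by
  have ecols : (if (R : Int) > 0 then (Cn : Int) else 0)
      = (((if 0 < R then Cn else 0) : Nat) : Int) := by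
    by_cases h : 0 < R
    · rw [if_pos (by exact_mod_cast h), if_pos h]
    · rw [if_neg (by omega), if_neg h]
      simp
  have eM : (if (R : Int) > (((if 0 < R then Cn else 0) : Nat) : Int)
        then (R : Int) else (((if 0 < R then Cn else 0) : Nat) : Int))
      = (((if (if 0 < R then Cn else 0) < R then R else (if 0 < R then Cn else 0)) : Nat) : Int) := by
    by_cases h : (if 0 < R then Cn else 0) < R
    · rw [if_pos (by exact_mod_cast h), if_pos h]
    · rw [if_neg (by exact_mod_cast h), if_neg h]
  have hCN : (if 0 < R then Cn else 0) ≤ 2 ^ 32 := by split_ifs <;> omega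
  have hM : (if (if 0 < R then Cn else 0) < R then R else (if 0 < R then Cn else 0)) ≤ 2 ^ 32 := by
    split_ifs <;> omega
  have hk32 : find_k (((if (if 0 < R then Cn else 0) < R then R else (if 0 < R then Cn else 0)) : Nat) : Int) 0 ≤ 32 :=
    find_k_le _ 0 (by exact_mod_cast hM) (by omega)
  have hMk : (if (if 0 < R then Cn else 0) < R then R else (if 0 < R then Cn else 0))
      ≤ 2 ^ (find_k (((if (if 0 < R then Cn else 0) < R then R else (if 0 < R then Cn else 0)) : Nat) : Int) 0) := by
    have h := find_k_ge (((if (if 0 < R then Cn else 0) < R then R else (if 0 < R then Cn else 0)) : Nat) : Int) 0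
    exact_mod_cast h
  have hRk : R ≤ 2 ^ (find_k (((if (if 0 < R then Cn else 0) < R then R else (if 0 < R then Cn else 0)) : Nat) : Int) 0) := by
    have : R ≤ (if (if 0 < R then Cn else 0) < R then R else (if 0 < R then Cn else 0)) := by
      split_ifs <;> omega
    omega
  have hCk : (if 0 < R then Cn else 0) ≤ 2 ^ (find_k (((if (if 0 < R then Cn else 0) < R then R else (if 0 < R then Cn else 0)) : Nat) : Int) 0) := by
    have : (if 0 < R then Cn else 0) ≤ (if (if 0 < R then Cn else 0) < R then R else (if 0 < R then Cn else 0)) := by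
      split_ifs <;> omega
    omega
  rw [ecols] at *
  rw [eM]
  exact core R (if 0 < R then Cn else 0)
    (find_k (((if (if 0 < R then Cn else 0) < R then R else (if 0 < R then Cn else 0)) : Nat) : Int) 0)
    (Nat.pow_le_pow_right (by omega) hk32) hk32 hRk hCk

theorem pyGetD_zero_headD (grid : List (List Int)) :
    PySem.List.pyGetD grid 0 [] = grid.headD [] := by
  cases grid
  · rfl
  · simp [PySem.List.pyGetD, PySem.List.pyGet?, PySem.List.pyIdx?]

theorem final_glue (grid : List (List Int))
    (hpre : grid.length ≤ 2 ^ 32 ∧ (grid.headD []).length ≤ 2 ^ 32) :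
    compute_morton_order grid = compute_morton_order_alt grid := by
  obtain ⟨hR, hC⟩ := hpre
  have hCn : (PySem.List.pyGetD grid 0 []).length ≤ 2 ^ 32 := by
    rw [pyGetD_zero_headD grid]; exact hC
  exact glue grid.length (PySem.List.pyGetD grid 0 []).length hR hCn

-- ===== VERDICT (by name: the statement is the Claim_ definition above) =====
theorem compute_morton_order_spec : Claim_equal_compute_morton_order := by
  intro grid _ hpre
  exact final_glue grid hpre
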